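-- pv_equiv track=rewrite | github.com/bamboosingsinwind/interview | interview_code/.history/python/xiecheng0504-3_20230511000844.py | check
-- ===== SOURCE A (Python) =====
-- def check(str1):
--     n = len(str1)
--
--     # if n<3: return True
--
--     for i in range(n-1):
--         if str1[i] == str1[i+1] and str1[i]!='?':
--             return False
--     if n < 3: return True
--     for i in range(len(str1)-2):
--         cnt = str1[i:i+3].count('1')
--         if cnt % 2: return False   # odd counts are not minimal strings
--     return True
-- ===== SOURCE B (Python) =====
-- def check(str1):
--     if any(a == b and a != '?' for a, b in zip(str1, str1[1:])):
--         return False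
--     n = len(str1)
--     if n < 3:
--         return True
--     pref = [0]
--     for c in str1:
--         pref.append(pref[-1] + (c == '1'))
--     return all((pref[i + 3] - pref[i]) % 2 == 0 for i in range(n - 2))
-- ===== Notes on version B (the rewrite author's own statement) =====
-- stated objective: alternative
-- what changed: Replaced A's repeated 3-character slicing and counting per window with a prefix-sum array of one-counts (window parity read as a difference of two prefix entries) and the index-based adjacent-pair loop with a zip/any scan.
import Mathlib
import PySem

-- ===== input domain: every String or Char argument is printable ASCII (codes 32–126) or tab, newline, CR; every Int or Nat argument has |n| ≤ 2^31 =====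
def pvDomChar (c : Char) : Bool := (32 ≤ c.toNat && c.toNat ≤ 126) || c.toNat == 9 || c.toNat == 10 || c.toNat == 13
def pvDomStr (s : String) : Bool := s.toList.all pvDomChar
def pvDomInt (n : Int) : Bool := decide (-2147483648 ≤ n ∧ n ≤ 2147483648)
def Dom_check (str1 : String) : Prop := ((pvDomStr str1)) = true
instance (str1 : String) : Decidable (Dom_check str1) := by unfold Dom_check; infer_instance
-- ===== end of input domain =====

-- B replaces A's repeated 3-character slice-and-count with a prefix-sum array of '1'-counts
-- (objective: alternative decomposition; same exact Boolean result).

-- ===== PORT A =====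
-- first loop of A: scan adjacent pairs, return False (true = "failed") on equal non-'?' pair
def checkAdjLoop : List Char → Bool
  | a :: b :: rest => if a == b && a != '?' then true else checkAdjLoop (b :: rest)
  | _ => false

-- second loop of A: each 3-window's count of '1' must be even
def checkWinLoop : List Char → Bool
  | a :: b :: c :: rest =>
      let cnt := ([a, b, c].count '1')
      if cnt % 2 = 1 then false else checkWinLoop (b :: c :: rest)
  | _ => true
  termination_by l => l.length
  decreasing_by simp

def check (str1 : String) : Bool :=
  let cs := str1.toList
  let n := cs.length
  if checkAdjLoop cs then false
  else if n < 3 then true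
  else checkWinLoop cs

-- ===== PORT B =====
-- prefix-sum array: pref[k] = number of '1' in the first k characters (pref[-1] = getLast!,
-- exact since pref starts non-empty [0])
def buildPref (cs : List Char) : List Int :=
  cs.foldl (fun pref c => pref ++ [pref.getLast! + (if c == '1' then 1 else 0)]) [0]

def check_alt (str1 : String) : Bool :=
  let cs := str1.toList
  if (cs.zip (cs.drop 1)).any (fun p => p.1 == p.2 && p.1 != '?') then false
  else
    let n := cs.length
    if n < 3 then true
    else
      let pref := buildPref cs
      (List.range (n - 2)).all (fun i => (pref.getD (i + 3) 0 - pref.getD i 0) % 2 == 0)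

-- ===== PRECONDITION & SPEC =====
def Spec_check (str1 : String) (out : Bool) : Prop := out = check_alt str1
instance (str1 : String) (out : Bool) : Decidable (Spec_check str1 out) := by unfold Spec_check; infer_instance

-- ===== CLAIM (what is proved, stated in full; the proofs are below) =====
def Claim_equal_check : Prop := ∀ (str1 : String), Dom_check str1 → Spec_check str1 (check str1)

-- ===== LEMMAS AND PROOFS =====

-- adjacent-pair loop of A equals B's zip/any
theorem adj_eq (cs : List Char) :
    checkAdjLoop cs = (cs.zip (cs.drop 1)).any (fun p => p.1 == p.2 && p.1 != '?') := by
  fun_induction checkAdjLoop cs with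
  | case1 a b rest h =>
      simp at h ⊢
      obtain ⟨rfl, hq⟩ := h
      exact Or.inl ⟨rfl, hq⟩
  | case2 a b rest h ih => simp_all
  | case3 l h => cases l with
    | nil => simp
    | cons a t => cases t with
      | nil => simp
      | cons b t' => exact absurd rfl (h a b t')

-- spec-level prefix sums (proof helper only)
def psums (s : Int) : List Char → List Int
  | [] => []
  | c :: cs => (s + (if c == '1' then 1 else 0)) :: psums (s + (if c == '1' then 1 else 0)) cs

theorem foldl_build (cs : List Char) (acc : List Int) (h : acc ≠ []) :
    cs.foldl (fun pref c => pref ++ [pref.getLast! + (if c == '1' then 1 else 0)]) acc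
      = acc ++ psums (acc.getLast!) cs := by
  induction cs generalizing acc with
  | nil => simp [psums]
  | cons c cs ih =>
      rw [List.foldl_cons, ih _ (by simp)]
      simp [psums]

theorem psums_getD (cs : List Char) (s : Int) (i : ℕ) (hi : i ≤ cs.length) :
    (s :: psums s cs).getD i 0 = s + ((cs.take i).count '1' : ℤ) := by
  induction cs generalizing s i with
  | nil =>
      simp only [List.length_nil, Nat.le_zero] at hi
      subst hi; simp
  | cons c cs ih =>
      cases i with
      | zero => simp
      | succ j =>
          simp only [psums, List.getD_cons_succ]
          rw [ih _ j (by simpa using hi)]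
          by_cases hc : c = '1' <;> simp [hc] <;> try ring

theorem buildPref_getD (cs : List Char) (i : ℕ) (hi : i ≤ cs.length) :
    (buildPref cs).getD i 0 = ((cs.take i).count '1' : ℤ) := by
  have := foldl_build cs [0] (by simp)
  unfold buildPref
  rw [this]
  simpa using psums_getD cs 0 i hi

-- the window diff through prefix counts
theorem window_diff (cs : List Char) (i : ℕ) (hi : i + 3 ≤ cs.length) :
    (buildPref cs).getD (i + 3) 0 - (buildPref cs).getD i 0
      = (((cs.drop i).take 3).count '1' : ℤ) := by
  rw [buildPref_getD cs (i + 3) hi, buildPref_getD cs i (by omega)]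
  have : cs.take (i + 3) = cs.take i ++ (cs.drop i).take 3 := by
    rw [List.take_add]
  rw [this, List.count_append]
  push_cast
  ring

-- A's window loop says: every 3-window has an even count of '1'
theorem winLoop_iff (cs : List Char) :
    checkWinLoop cs = true ↔ ∀ i, i + 3 ≤ cs.length → (((cs.drop i).take 3).count '1') % 2 = 0 := by
  fun_induction checkWinLoop cs with
  | case1 a b c rest cnt h =>
      constructor
      · intro hc; cases hc
      · intro hall
        have h0 := hall 0 (by simp)
        simp only [List.drop_zero] at h0
        exfalso
        have : cnt % 2 = 0 := by simpa [cnt] using h0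
        omega
  | case2 a b c rest cnt h ih =>
      rw [ih]
      constructor
      · intro hall i hlen
        cases i with
        | zero =>
            have : cnt % 2 = 0 := by omega
            simpa [cnt] using this
        | succ j =>
            have := hall j (by simpa using hlen)
            simpa using this
      · intro hall j hj
        have := hall (j + 1) (by simpa using hj)
        simpa using this
  | case3 l h =>
      have hl : l.length < 3 := by
        match l, h with
        | [], _ => simp
        | [a], _ => simp
        | [a, b], _ =>
            simp
        | a :: b :: c :: r, h => exact absurd rfl (h a b c r)
      constructor
      · intro _ i hlen; exact absurd hlen (by omega)
      · intro _; rfl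

-- B's window check says the same
theorem alt_all_iff (cs : List Char) (h3 : 3 ≤ cs.length) :
    ((List.range (cs.length - 2)).all fun i =>
        ((buildPref cs).getD (i + 3) 0 - (buildPref cs).getD i 0) % 2 == 0) = true
      ↔ ∀ i, i + 3 ≤ cs.length → (((cs.drop i).take 3).count '1') % 2 = 0 := by
  simp only [List.all_eq_true, List.mem_range]
  constructor
  · intro hall i hlen
    have := hall i (by omega)
    rw [window_diff cs i hlen] at this
    simp only [beq_iff_eq] at this
    omega
  · intro hall i hlt
    have hlen : i + 3 ≤ cs.length := by omega
    have := hall i hlen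
    rw [window_diff cs i hlen]
    simp only [beq_iff_eq]
    omega

-- ===== VERDICT (by name: the statement is the Claim_ definition above) =====
theorem check_spec : Claim_equal_check := by
  intro str1 _
  unfold Spec_check check check_alt
  simp only [adj_eq]
  split
  · rfl
  · split
    · rfl
    · next h2 =>
      rw [Bool.eq_iff_iff, winLoop_iff, alt_all_iff str1.toList (by omega)]
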